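-- pv_equiv track=rewrite | github.com/romo9889/findPublicMedia | vibe_streamer.py | pick_best_archive_item
-- ===== SOURCE A (Python) =====
-- from typing import Optional, Tuple
--
-- def pick_best_archive_item(candidates: list, title: str) -> Optional[str]:
--     """Pick the best Archive.org item identifier from candidates."""
--     if not candidates:
--         return None
--
--     # Simple heuristic: prefer items with title match and avoid trailers
--     tnorm = title.lower().replace(" ", "")
--     for c in candidates:
--         ident = (c.get("identifier") or "").lower()
--         dtitle = (c.get("title") or "").lower()
--         if "trailer" in ident or "trailer" in dtitle:
--             continue
--         if tnorm[:8] in ident or tnorm in dtitle.replace(" ", ""):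
--             return c.get("identifier")
--
--     # Fallback: return first non-trailer
--     for c in candidates:
--         ident = (c.get("identifier") or "").lower()
--         if "trailer" not in ident:
--             return c.get("identifier")
--
--     return candidates[0].get("identifier") if candidates else None
-- ===== SOURCE B (Python) =====
-- from typing import Optional
--
-- def pick_best_archive_item(candidates: list, title: str) -> Optional[str]:
--     """Single pass: return first non-trailer title match, else first non-trailer-ident, else first."""
--     if not candidates:
--         return None
--     tnorm = title.lower().replace(" ", "")
--     fallback = None
--     for c in candidates:
--         ident = (c.get("identifier") or "").lower()
--         dtitle = (c.get("title") or "").lower()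
--         if "trailer" not in ident and "trailer" not in dtitle and \
--            (tnorm[:8] in ident or tnorm in dtitle.replace(" ", "")):
--             return c.get("identifier")
--         if fallback is None and "trailer" not in ident:
--             fallback = c
--     return (fallback if fallback is not None else candidates[0]).get("identifier")
-- ===== Notes on version B (the rewrite author's own statement) =====
-- stated objective: alternative
-- what changed: A's two sequential scans (title-match scan, then a separate fallback scan for the first non-trailer identifier) are fused into one pass that records the fallback candidate in an accumulator while scanning for a match.
import Mathlib
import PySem

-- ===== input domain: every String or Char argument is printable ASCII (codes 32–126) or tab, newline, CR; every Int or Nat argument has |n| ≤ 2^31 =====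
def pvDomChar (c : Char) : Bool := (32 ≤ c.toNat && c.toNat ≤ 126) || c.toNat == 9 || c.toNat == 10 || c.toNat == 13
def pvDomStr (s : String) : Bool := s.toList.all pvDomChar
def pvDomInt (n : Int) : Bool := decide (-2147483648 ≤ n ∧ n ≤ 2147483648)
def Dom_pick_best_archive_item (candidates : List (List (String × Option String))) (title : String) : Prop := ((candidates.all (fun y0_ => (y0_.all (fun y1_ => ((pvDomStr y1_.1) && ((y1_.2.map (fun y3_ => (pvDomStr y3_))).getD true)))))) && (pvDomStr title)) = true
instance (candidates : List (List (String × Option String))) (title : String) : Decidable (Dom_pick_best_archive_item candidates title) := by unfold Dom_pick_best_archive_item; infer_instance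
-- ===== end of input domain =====

-- B fuses A's two sequential scans into one pass carrying a fallback accumulator; objective: alternative decomposition.

-- ===== PORT A =====
-- c.get(k): dict lookup (first match) then 'or'-collapse of a None value happens at the use sites;
-- here get returns Python's c.get(k) (None for missing key or None value) as Option String.
def pvGetKey (c : List (String × Option String)) (k : String) : Option String :=
  ((PySem.Dict.mk c).get? k).join

-- first loop of A: 'some r' = the loop executed 'return r', 'none' = fell through
def pvALoop1 (tnorm : String) : List (List (String × Option String)) → Option (Option String)
  | [] => none
  | c :: rest =>
    let ident := PySem.Str.lower ((pvGetKey c "identifier").getD "")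
    let dtitle := PySem.Str.lower ((pvGetKey c "title").getD "")
    if PySem.Str.isIn "trailer" ident || PySem.Str.isIn "trailer" dtitle then
      pvALoop1 tnorm rest
    else if PySem.Str.isIn (PySem.Str.slice tnorm none (some 8)) ident
            || PySem.Str.isIn tnorm (PySem.Str.replace dtitle " " "") then
      some (pvGetKey c "identifier")
    else pvALoop1 tnorm rest

-- second (fallback) loop of A
def pvALoop2 : List (List (String × Option String)) → Option (Option String)
  | [] => none
  | c :: rest =>
    let ident := PySem.Str.lower ((pvGetKey c "identifier").getD "")
    if !(PySem.Str.isIn "trailer" ident) then some (pvGetKey c "identifier")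
    else pvALoop2 rest

def pick_best_archive_item (candidates : List (List (String × Option String))) (title : String) : Option String :=
  match candidates with
  | [] => none
  | c0 :: _ =>
    let tnorm := PySem.Str.replace (PySem.Str.lower title) " " ""
    match pvALoop1 tnorm candidates with
    | some r => r
    | none =>
      match pvALoop2 candidates with
      | some r => r
      | none => pvGetKey c0 "identifier"

-- ===== PORT B =====
def pvGetKeyB (c : List (String × Option String)) (k : String) : Option String :=
  ((PySem.Dict.mk c).get? k).join

-- B's single loop: fb is the recorded fallback candidate, c0 the first candidate (for the final default)
def pvBLoop (tnorm : String) (fb : Option (List (String × Option String)))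
    (c0 : List (String × Option String)) :
    List (List (String × Option String)) → Option String
  | [] =>
    match fb with
    | some f => pvGetKeyB f "identifier"
    | none => pvGetKeyB c0 "identifier"
  | c :: rest =>
    let ident := PySem.Str.lower ((pvGetKeyB c "identifier").getD "")
    let dtitle := PySem.Str.lower ((pvGetKeyB c "title").getD "")
    if !(PySem.Str.isIn "trailer" ident) && !(PySem.Str.isIn "trailer" dtitle)
        && (PySem.Str.isIn (PySem.Str.slice tnorm none (some 8)) ident
            || PySem.Str.isIn tnorm (PySem.Str.replace dtitle " " "")) then
      pvGetKeyB c "identifier"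
    else
      pvBLoop tnorm
        (if fb.isNone && !(PySem.Str.isIn "trailer" ident) then some c else fb) c0 rest

def pick_best_archive_item_alt (candidates : List (List (String × Option String))) (title : String) : Option String :=
  match candidates with
  | [] => none
  | c0 :: _ =>
    pvBLoop (PySem.Str.replace (PySem.Str.lower title) " " "") none c0 candidates

-- ===== PRECONDITION & SPEC =====
def Spec_pick_best_archive_item (candidates : List (List (String × Option String))) (title : String) (out : Option String) : Prop := out = pick_best_archive_item_alt candidates title
instance (candidates : List (List (String × Option String))) (title : String) (out : Option String) : Decidable (Spec_pick_best_archive_item candidates title out) := by unfold Spec_pick_best_archive_item; infer_instance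

-- ===== CLAIM (what is proved, stated in full; the proofs are below) =====
def Claim_equal_pick_best_archive_item : Prop := ∀ (candidates : List (List (String × Option String))) (title : String), Dom_pick_best_archive_item candidates title → Spec_pick_best_archive_item candidates title (pick_best_archive_item candidates title)

-- ===== LEMMAS AND PROOFS =====

-- B's fused loop equals A's two scans, for any accumulator state fb.
theorem pvBLoop_eq (tnorm : String) (c0 : List (String × Option String))
    (cs : List (List (String × Option String))) :
    ∀ fb : Option (List (String × Option String)),
      pvBLoop tnorm fb c0 cs =
        match pvALoop1 tnorm cs with
        | some r => r
        | none =>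
          match fb with
          | some f => pvGetKeyB f "identifier"
          | none =>
            match pvALoop2 cs with
            | some r => r
            | none => pvGetKeyB c0 "identifier" := by
  induction cs with
  | nil => intro fb; cases fb <;> simp [pvBLoop, pvALoop1, pvALoop2]
  | cons c rest ih =>
    intro fb
    simp only [pvBLoop, pvALoop1, pvALoop2, pvGetKeyB, pvGetKey]
    by_cases hp : PySem.Str.isIn "trailer"
        (PySem.Str.lower ((((PySem.Dict.mk c).get? "identifier").join).getD "")) = true
    · -- ident contains "trailer": A skips, B cannot return and does not record fb
      simp only [hp, Bool.true_or, Bool.not_true, Bool.false_and, Bool.and_false, reduceIte]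
      cases fb <;> simp only [ih] <;> try rfl
    · rw [Bool.not_eq_true] at hp
      by_cases hq : PySem.Str.isIn "trailer"
          (PySem.Str.lower ((((PySem.Dict.mk c).get? "title").join).getD "")) = true
      · -- dtitle contains "trailer": A skips, B records c as fallback if none yet
        simp only [hp, hq, Bool.false_or, Bool.not_true, Bool.not_false,
          Bool.false_and, Bool.and_false, Bool.and_true, reduceIte]
        cases fb <;>
            simp only [ih, Option.isNone_some, Option.isNone_none, reduceIte, pvGetKeyB] <;>
          try rfl
      · rw [Bool.not_eq_true] at hq
        -- neither contains "trailer": same match test decides both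
        by_cases hm : (PySem.Str.isIn (PySem.Str.slice tnorm none (some 8))
              (PySem.Str.lower ((((PySem.Dict.mk c).get? "identifier").join).getD ""))
            || PySem.Str.isIn tnorm (PySem.Str.replace
              (PySem.Str.lower ((((PySem.Dict.mk c).get? "title").join).getD "")) " " "")) = true
        · simp only [hp, hq, hm, Bool.false_or, Bool.not_false, Bool.true_and, reduceIte]
          rfl
        · rw [Bool.not_eq_true] at hm
          simp only [hp, hq, hm, Bool.false_or, Bool.not_false, Bool.true_and,
            Bool.and_false, reduceIte]
          cases fb <;>
              simp only [ih, Option.isNone_some, Option.isNone_none, pvGetKeyB] <;>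
            try rfl

-- ===== VERDICT (by name: the statement is the Claim_ definition above) =====
theorem pick_best_archive_item_spec : Claim_equal_pick_best_archive_item := by
  intro candidates title _
  unfold Spec_pick_best_archive_item
  cases candidates with
  | nil => rfl
  | cons c0 rest =>
    simp only [pick_best_archive_item, pick_best_archive_item_alt]
    rw [pvBLoop_eq]
    simp only [pvGetKeyB, pvGetKey]
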